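-- pv_equiv track=rewrite | github.com/Siindbad/HackHub-Save-File-Editor | source/core/domain_impl/json/json_raw_edit_guard_service.py | _line_local_value_window
-- ===== SOURCE A (Python) =====
-- def _line_local_value_window(line_text: str, colon_idx: int) -> tuple[int, int, bool] | None:
--     text = str(line_text or "")
--     value_start = int(colon_idx) + 1
--     while value_start < len(text) and text[value_start] in (" ", "\t", "\r"):
--         value_start += 1
--     if value_start >= len(text):
--         return None
--     idx = value_start
--     in_string = False
--     escaped = False
--     while idx < len(text):
--         ch = text[idx]
--         if in_string:
--             if escaped:
--                 escaped = False
--             elif ch == "\\":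
--                 escaped = True
--             elif ch == '"':
--                 in_string = False
--             idx += 1
--             continue
--         if ch == '"':
--             in_string = True
--             idx += 1
--             continue
--         if ch in (",", "}", "]"):
--             break
--         idx += 1
--     value_end = idx
--     is_string = value_start < value_end and text[value_start] == '"' and value_end > value_start + 1 and text[value_end - 1] == '"'
--     return value_start, value_end, is_string
-- ===== SOURCE B (Python) =====
-- def _line_local_value_window(line_text: str, colon_idx: int) -> tuple[int, int, bool] | None:
--     text = str(line_text or "")
--     n = len(text)
--     value_start = int(colon_idx) + 1
--     while value_start < n and text[value_start] in (" ", "\t", "\r"):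
--         value_start += 1
--     if value_start >= n:
--         return None
--     # jump with str.find between interesting positions instead of scanning char by char:
--     # a quote opens a quoted section whose end is the next quote preceded by an even
--     # number of consecutive backslashes; outside quoted sections the first delimiter ends the value
--     pos = value_start
--     while pos < n:
--         quote = text.find('"', pos)
--         delim = n
--         for c in ',}]':
--             i = text.find(c, pos)
--             if i != -1 and i < delim:
--                 delim = i
--         if quote == -1 or delim < quote:
--             pos = delim
--             break
--         j = quote + 1
--         while True:
--             k = text.find('"', j)
--             if k == -1:
--                 pos = n
--                 break
--             b = k - 1
--             while b >= 0 and text[b] == '\\':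
--                 b -= 1
--             if (k - 1 - b) % 2 == 0:
--                 pos = k + 1
--                 break
--             j = k + 1
--     value_end = pos
--     is_string = value_start < value_end and text[value_start] == '"' and value_end > value_start + 1 and text[value_end - 1] == '"'
--     return value_start, value_end, is_string
-- ===== Notes on version B (the rewrite author's own statement) =====
-- stated objective: faster
-- what changed: A's per-character scan with in_string/escaped state flags is replaced by str.find jumps to the next quote/delimiter, with a quote accepted as closing a quoted section iff the backslash run immediately before it has even length.
-- outside the precondition, e.g. on _line_local_value_window('a,b', -3): A returns (-2, -2, False), B returns (-2, 1, False)
import Mathlib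
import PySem

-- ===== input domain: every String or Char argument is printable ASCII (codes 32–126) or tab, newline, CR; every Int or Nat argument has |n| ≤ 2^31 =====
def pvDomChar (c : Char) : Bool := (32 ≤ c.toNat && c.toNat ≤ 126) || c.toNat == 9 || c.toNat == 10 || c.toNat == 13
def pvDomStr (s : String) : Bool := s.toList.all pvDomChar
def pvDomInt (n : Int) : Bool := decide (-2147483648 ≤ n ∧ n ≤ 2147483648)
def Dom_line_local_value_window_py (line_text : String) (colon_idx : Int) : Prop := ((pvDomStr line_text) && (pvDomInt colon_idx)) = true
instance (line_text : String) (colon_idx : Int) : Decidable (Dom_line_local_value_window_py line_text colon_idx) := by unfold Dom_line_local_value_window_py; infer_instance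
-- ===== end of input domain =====

-- B replaces A's per-character in_string/escaped state machine by str.find jumps between the next
-- quote / next delimiter, deciding whether a quote closes a quoted section by the parity of the
-- backslash run just before it (objective: faster, measured constant-factor: the scan work moves
-- into C-level str.find); return values proved identical on Pre_.

-- ===== PORT A =====
-- shared indexing primitive: Python text[i] (negative indices wrap; the default is unreachable
-- on Pre_, where every index handed to it is in range)
def pvGetC (t : List Char) (i : Int) : Char := (PySem.List.pyGet? t i).getD 'x'

-- leading-whitespace skip loop (textually identical in A and B, so shared)
def pvSkipWs (t : List Char) : Nat → Int → Int
  | 0, vs => vs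
  | k + 1, vs =>
    if vs < (t.length : Int) ∧ (pvGetC t vs = ' ' ∨ pvGetC t vs = '\t' ∨ pvGetC t vs = '\r') then
      pvSkipWs t k (vs + 1)
    else vs

-- A's main while loop: one char per iteration, state (in_string, escaped)
def pvA_loop (t : List Char) : Nat → Int → Bool → Bool → Int
  | 0, idx, _, _ => idx
  | k + 1, idx, in_string, escaped =>
    if idx < (t.length : Int) then
      let ch := pvGetC t idx
      if in_string then
        if escaped then pvA_loop t k (idx + 1) in_string false
        else if ch = '\\' then pvA_loop t k (idx + 1) in_string true
        else if ch = '"' then pvA_loop t k (idx + 1) false escaped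
        else pvA_loop t k (idx + 1) in_string escaped
      else if ch = '"' then pvA_loop t k (idx + 1) true escaped
      else if ch = ',' ∨ ch = '}' ∨ ch = ']' then idx
      else pvA_loop t k (idx + 1) in_string escaped
    else idx

def line_local_value_window_py (line_text : String) (colon_idx : Int) : Option (Int × Int × Bool) :=
  let t := line_text.toList
  let value_start := pvSkipWs t ((t.length : Int) - (colon_idx + 1)).toNat (colon_idx + 1)
  if value_start ≥ (t.length : Int) then none
  else
    let value_end := pvA_loop t ((t.length : Int) - value_start).toNat value_start false false
    some (value_start, value_end,
      decide (value_start < value_end) && (pvGetC t value_start == '"') &&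
      decide (value_start + 1 < value_end) && (pvGetC t (value_end - 1) == '"'))

-- ===== PORT B =====
-- Python's text.find(c, pos) for a one-character needle, ported by hand as the obvious
-- left-to-right scan (exact: same clamped negative start, -1 when absent)
def pvFindGo (t : List Char) (c : Char) (j : Nat) : Int :=
  if h : j < t.length then
    if pvGetC t (j : Int) = c then (j : Int) else pvFindGo t c (j + 1)
  else -1
termination_by t.length - j

def pvFind (t : List Char) (c : Char) (pos : Int) : Int :=
  pvFindGo t c (if pos < 0 then (t.length + pos).toNat else pos.toNat)

-- B's 'for c in ",}]"' loop computing the nearest delimiter (default n)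
def pvDelim (t : List Char) (pos : Int) : Int :=
  [',', '}', ']'].foldl
    (fun delim c =>
      if pvFind t c pos ≠ -1 ∧ pvFind t c pos < delim then pvFind t c pos else delim)
    (t.length : Int)

-- B's 'while b >= 0 and text[b] == "\\"' backslash-run walk
def pvRunB (t : List Char) (b : Int) : Int :=
  if h : 0 ≤ b ∧ pvGetC t b = '\\' then pvRunB t (b - 1) else b
termination_by (b + 1).toNat
decreasing_by obtain ⟨hb, -⟩ := h; omega

-- B's inner 'while True' loop: jump to the next quote, accept it iff its backslash run is even
def pvB_inner (t : List Char) : Nat → Int → Int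
  | 0, _ => (t.length : Int)
  | fuel + 1, j =>
    if pvFind t '"' j = -1 then (t.length : Int)
    else if (pvFind t '"' j - 1 - pvRunB t (pvFind t '"' j - 1)) % 2 = 0 then pvFind t '"' j + 1
    else pvB_inner t fuel (pvFind t '"' j + 1)

-- B's outer 'while pos < n' loop
def pvB_outer (t : List Char) : Nat → Int → Int
  | 0, pos => pos
  | fuel + 1, pos =>
    if pos < (t.length : Int) then
      if pvFind t '"' pos = -1 ∨ pvDelim t pos < pvFind t '"' pos then pvDelim t pos
      else pvB_outer t fuel
        (pvB_inner t ((t.length : Int) + 1 - (pvFind t '"' pos + 1)).toNat (pvFind t '"' pos + 1))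
    else pos

def line_local_value_window_py_alt (line_text : String) (colon_idx : Int) : Option (Int × Int × Bool) :=
  let t := line_text.toList
  let value_start := pvSkipWs t ((t.length : Int) - (colon_idx + 1)).toNat (colon_idx + 1)
  if value_start ≥ (t.length : Int) then none
  else
    let value_end := pvB_outer t ((t.length : Int) - value_start).toNat value_start
    some (value_start, value_end,
      decide (value_start < value_end) && (pvGetC t value_start == '"') &&
      decide (value_start + 1 < value_end) && (pvGetC t (value_end - 1) == '"'))

-- ===== PRECONDITION & SPEC =====
-- Pre_ excludes colon_idx < -1: outside the function's natural domain (colon_idx is the index of a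
-- ':' found in the line), where A raises IndexError when colon_idx + 1 < -len(line_text) and
-- otherwise scans through Python's negative-index wraparound, which B does not reproduce.
def Pre_line_local_value_window_py (line_text : String) (colon_idx : Int) : Prop :=
  -1 ≤ colon_idx
instance (line_text : String) (colon_idx : Int) : Decidable (Pre_line_local_value_window_py line_text colon_idx) := by unfold Pre_line_local_value_window_py; infer_instance
def pvWitness_line_local_value_window_py : String × Int := ("\"k\": 12,", 4)

def Spec_line_local_value_window_py (line_text : String) (colon_idx : Int) (out : Option (Int × Int × Bool)) : Prop := out = line_local_value_window_py_alt line_text colon_idx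
instance (line_text : String) (colon_idx : Int) (out : Option (Int × Int × Bool)) : Decidable (Spec_line_local_value_window_py line_text colon_idx out) := by unfold Spec_line_local_value_window_py; infer_instance

-- ===== CLAIM (what is proved, stated in full; the proofs are below) =====
def Claim_equal_line_local_value_window_py : Prop := ∀ (line_text : String) (colon_idx : Int), Dom_line_local_value_window_py line_text colon_idx → Pre_line_local_value_window_py line_text colon_idx → Spec_line_local_value_window_py line_text colon_idx (line_local_value_window_py line_text colon_idx)

-- ===== LEMMAS AND PROOFS =====

-- A's quote-run-parity invariant: an even backslash run ends just before position p
def pvEvenRun (t : List Char) (p : Int) : Prop := (p - 1 - pvRunB t (p - 1)) % 2 = 0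

-- loops past the end of the text return their cursor, whatever fuel is left
theorem pvA_out (t : List Char) (k : Nat) (idx : Int) (b e : Bool) (h : ¬ idx < (t.length : Int)) :
    pvA_loop t k idx b e = idx := by cases k <;> simp [pvA_loop, h]

theorem pvB_outer_out (t : List Char) (k : Nat) (pos : Int) (h : ¬ pos < (t.length : Int)) :
    pvB_outer t k pos = pos := by cases k <;> simp [pvB_outer, h]

-- find: reduction to the Nat scan, one-step unfolding, and its specification
theorem pvFind_eq_go (t : List Char) (c : Char) (p : Int) (h0 : 0 ≤ p) :
    pvFind t c p = pvFindGo t c p.toNat := by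
  unfold pvFind; rw [if_neg (by omega)]

theorem pvFind_step (t : List Char) (c : Char) (p : Int) (h0 : 0 ≤ p)
    (h : p < (t.length : Int)) :
    pvFind t c p = if pvGetC t p = c then p else pvFind t c (p + 1) := by
  rw [pvFind_eq_go t c p h0, pvFind_eq_go t c (p + 1) (by omega)]
  rw [pvFindGo]
  have hj : p.toNat < t.length := by omega
  rw [dif_pos hj]
  have h1 : ((p.toNat : Nat) : Int) = p := by omega
  have h2 : (p + 1).toNat = p.toNat + 1 := by omega
  rw [h1, h2]

theorem pvFind_none (t : List Char) (c : Char) (p : Int) (h0 : 0 ≤ p)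
    (h : (t.length : Int) ≤ p) : pvFind t c p = -1 := by
  rw [pvFind_eq_go t c p h0, pvFindGo, dif_neg (by omega)]

theorem pvFind_self (t : List Char) (c : Char) (p : Int) (h0 : 0 ≤ p)
    (h : p < (t.length : Int)) (hc : pvGetC t p = c) : pvFind t c p = p := by
  rw [pvFind_step t c p h0 h, if_pos hc]

theorem pvFind_shift (t : List Char) (c : Char) (p : Int) (h0 : 0 ≤ p)
    (h : p < (t.length : Int)) (hc : pvGetC t p ≠ c) : pvFind t c p = pvFind t c (p + 1) := by
  rw [pvFind_step t c p h0 h, if_neg hc]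

theorem pvFind_spec (t : List Char) (c : Char) : ∀ (m : Nat) (p : Int), 0 ≤ p →
    ((t.length : Int) - p).toNat ≤ m →
    pvFind t c p = -1 ∨
      (p ≤ pvFind t c p ∧ pvFind t c p < (t.length : Int) ∧ pvGetC t (pvFind t c p) = c) := by
  intro m
  induction m with
  | zero =>
      intro p h0 hm
      exact Or.inl (pvFind_none t c p h0 (by omega))
  | succ m ih =>
      intro p h0 hm
      by_cases hlt : p < (t.length : Int)
      · rw [pvFind_step t c p h0 hlt]
        by_cases hc : pvGetC t p = c
        · rw [if_pos hc]; exact Or.inr ⟨le_refl p, hlt, hc⟩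
        · rw [if_neg hc]
          rcases ih (p + 1) (by omega) (by omega) with h | ⟨h1, h2, h3⟩
          · exact Or.inl h
          · exact Or.inr ⟨by omega, h2, h3⟩
      · exact Or.inl (pvFind_none t c p h0 (by omega))

-- delimiter fold: bounds, exact hit, shift past an uninteresting char, past the end
theorem pvDelim_bounds (t : List Char) (p : Int) (h0 : 0 ≤ p) (hn : p ≤ (t.length : Int)) :
    p ≤ pvDelim t p ∧ pvDelim t p ≤ (t.length : Int) := by
  have h1 := pvFind_spec t ',' ((t.length : Int) - p).toNat p h0 le_rfl
  have h2 := pvFind_spec t '}' ((t.length : Int) - p).toNat p h0 le_rfl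
  have h3 := pvFind_spec t ']' ((t.length : Int) - p).toNat p h0 le_rfl
  unfold pvDelim
  simp only [List.foldl]
  rcases h1 with h1 | ⟨h1a, h1b, -⟩ <;> rcases h2 with h2 | ⟨h2a, h2b, -⟩ <;>
    rcases h3 with h3 | ⟨h3a, h3b, -⟩ <;> split_ifs <;> omega

theorem pvDelim_self (t : List Char) (p : Int) (h0 : 0 ≤ p) (hlt : p < (t.length : Int))
    (hc : pvGetC t p = ',' ∨ pvGetC t p = '}' ∨ pvGetC t p = ']') : pvDelim t p = p := by
  have h1 := pvFind_spec t ',' ((t.length : Int) - p).toNat p h0 le_rfl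
  have h2 := pvFind_spec t '}' ((t.length : Int) - p).toNat p h0 le_rfl
  have h3 := pvFind_spec t ']' ((t.length : Int) - p).toNat p h0 le_rfl
  unfold pvDelim
  simp only [List.foldl]
  rcases hc with hc | hc | hc
  · have e := pvFind_self t ',' p h0 hlt hc
    rcases h2 with h2 | ⟨h2a, h2b, -⟩ <;> rcases h3 with h3 | ⟨h3a, h3b, -⟩ <;>
      split_ifs <;> omega
  · have e := pvFind_self t '}' p h0 hlt hc
    rcases h1 with h1 | ⟨h1a, h1b, -⟩ <;> rcases h3 with h3 | ⟨h3a, h3b, -⟩ <;>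
      split_ifs <;> omega
  · have e := pvFind_self t ']' p h0 hlt hc
    rcases h1 with h1 | ⟨h1a, h1b, -⟩ <;> rcases h2 with h2 | ⟨h2a, h2b, -⟩ <;>
      split_ifs <;> omega

theorem pvDelim_shift (t : List Char) (p : Int) (h0 : 0 ≤ p) (hlt : p < (t.length : Int))
    (hc : ¬ (pvGetC t p = ',' ∨ pvGetC t p = '}' ∨ pvGetC t p = ']')) :
    pvDelim t p = pvDelim t (p + 1) := by
  push_neg at hc
  unfold pvDelim
  simp only [List.foldl]
  rw [pvFind_shift t ',' p h0 hlt hc.1, pvFind_shift t '}' p h0 hlt hc.2.1,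
      pvFind_shift t ']' p h0 hlt hc.2.2]

theorem pvDelim_past (t : List Char) (p : Int) (h0 : 0 ≤ p) (h : (t.length : Int) ≤ p) :
    pvDelim t p = (t.length : Int) := by
  unfold pvDelim
  simp only [List.foldl, pvFind_none t _ p h0 h]
  simp

-- the backslash-run walk: one-step behaviour
theorem pvRunB_stop (t : List Char) (b : Int) (h : ¬ (0 ≤ b ∧ pvGetC t b = '\\')) :
    pvRunB t b = b := by rw [pvRunB, dif_neg h]

theorem pvRunB_back (t : List Char) (b : Int) (h0 : 0 ≤ b) (h : pvGetC t b = '\\') :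
    pvRunB t b = pvRunB t (b - 1) := by rw [pvRunB]; rw [dif_pos ⟨h0, h⟩]

-- one-step unfolding lemmas
theorem pvA_main_step (t : List Char) (k : Nat) (idx : Int) (h : idx < (t.length : Int)) :
    pvA_loop t (k + 1) idx false false =
      if pvGetC t idx = '"' then pvA_loop t k (idx + 1) true false
      else if pvGetC t idx = ',' ∨ pvGetC t idx = '}' ∨ pvGetC t idx = ']' then idx
      else pvA_loop t k (idx + 1) false false := by
  simp only [pvA_loop, if_pos h, Bool.false_eq_true, if_false]

theorem pvA_str_step (t : List Char) (k : Nat) (idx : Int) (h : idx < (t.length : Int)) :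
    pvA_loop t (k + 1) idx true false =
      if pvGetC t idx = '\\' then pvA_loop t k (idx + 1) true true
      else if pvGetC t idx = '"' then pvA_loop t k (idx + 1) false false
      else pvA_loop t k (idx + 1) true false := by
  simp only [pvA_loop, if_pos h, if_true, Bool.false_eq_true, if_false]

theorem pvA_esc_step (t : List Char) (k : Nat) (idx : Int) (h : idx < (t.length : Int)) :
    pvA_loop t (k + 1) idx true true = pvA_loop t k (idx + 1) true false := by
  simp only [pvA_loop, if_pos h, if_true]

theorem pvB_inner_step (t : List Char) (fuel : Nat) (j : Int) :
    pvB_inner t (fuel + 1) j =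
      if pvFind t '"' j = -1 then (t.length : Int)
      else if (pvFind t '"' j - 1 - pvRunB t (pvFind t '"' j - 1)) % 2 = 0 then pvFind t '"' j + 1
      else pvB_inner t fuel (pvFind t '"' j + 1) := rfl

theorem pvB_outer_step (t : List Char) (fuel : Nat) (pos : Int) (h : pos < (t.length : Int)) :
    pvB_outer t (fuel + 1) pos =
      if pvFind t '"' pos = -1 ∨ pvDelim t pos < pvFind t '"' pos then pvDelim t pos
      else pvB_outer t fuel
        (pvB_inner t ((t.length : Int) + 1 - (pvFind t '"' pos + 1)).toNat (pvFind t '"' pos + 1)) := by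
  simp only [pvB_outer, if_pos h]

-- the whitespace skip never moves the cursor backwards
theorem pvSkipWs_ge (t : List Char) : ∀ (k : Nat) (vs : Int), vs ≤ pvSkipWs t k vs := by
  intro k
  induction k with
  | zero => intro vs; exact le_refl vs
  | succ k ih =>
      intro vs
      unfold pvSkipWs
      split_ifs
      · exact le_trans (by omega) (ih (vs + 1))
      · exact le_refl vs

-- MAIN LEMMA: A's state machine equals B's find-jumping loops, in both reachable states,
-- for any fuels at least the remaining measure
theorem pvAB (t : List Char) : ∀ (m : Nat) (p : Int), 0 ≤ p → ((t.length : Int) - p).toNat ≤ m →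
    (∀ ka kb, ((t.length : Int) - p).toNat ≤ ka → ((t.length : Int) - p).toNat ≤ kb →
      pvA_loop t ka p false false = pvB_outer t kb p)
    ∧ (p ≤ (t.length : Int) → pvEvenRun t p →
      ∀ ka kb ks, ((t.length : Int) - p).toNat ≤ ka → ((t.length : Int) - p).toNat ≤ kb →
        ((t.length : Int) + 1 - p).toNat ≤ ks →
        pvA_loop t ka p true false = pvB_outer t kb (pvB_inner t ks p)) := by
  intro m
  induction m with
  | zero =>
      intro p h0 hm
      have hge : ¬ p < (t.length : Int) := by omega
      constructor
      · intro ka kb _ _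
        rw [pvA_out t ka p false false hge, pvB_outer_out t kb p hge]
      · intro hpn _ ka kb ks _ _ hks
        have hpe : p = (t.length : Int) := by omega
        obtain ⟨ks', rfl⟩ : ∃ m, ks = m + 1 := ⟨ks - 1, by omega⟩
        rw [pvA_out t ka p true false hge, pvB_inner_step t ks' p,
            pvFind_none t '"' p h0 (by omega), if_pos rfl,
            pvB_outer_out t kb (t.length : Int) (by omega)]
        exact hpe
  | succ m ih =>
      intro p h0 hm
      by_cases hlt : p < (t.length : Int)
      · constructor
        · -- part 1: main state
          intro ka kb hka hkb
          obtain ⟨ka', rfl⟩ : ∃ x, ka = x + 1 := ⟨ka - 1, by omega⟩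
          obtain ⟨kb', rfl⟩ : ∃ x, kb = x + 1 := ⟨kb - 1, by omega⟩
          rw [pvA_main_step t ka' p hlt, pvB_outer_step t kb' p hlt]
          by_cases hq : pvGetC t p = '"'
          · have hfq : pvFind t '"' p = p := pvFind_self t '"' p h0 hlt hq
            have hd := pvDelim_bounds t p h0 (by omega)
            rw [if_pos hq, hfq, if_neg (by omega : ¬ (p = -1 ∨ pvDelim t p < p))]
            have hev : pvEvenRun t (p + 1) := by
              unfold pvEvenRun
              have e : p + 1 - 1 = p := by ring
              rw [e, pvRunB_stop t p (by intro hx; rw [hq] at hx; exact absurd hx.2 (by decide))]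
              omega
            exact (ih (p + 1) (by omega) (by omega)).2 (by omega) hev ka' kb'
              ((t.length : Int) + 1 - (p + 1)).toNat (by omega) (by omega) le_rfl
          · by_cases hdl : pvGetC t p = ',' ∨ pvGetC t p = '}' ∨ pvGetC t p = ']'
            · have hds := pvDelim_self t p h0 hlt hdl
              rw [if_neg hq, if_pos hdl]
              rcases pvFind_spec t '"' ((t.length : Int) - p).toNat p h0 le_rfl with hf | ⟨hf1, hf2, hf3⟩
              · rw [if_pos (Or.inl hf), hds]
              · have hgt : p < pvFind t '"' p := by
                  rcases lt_or_eq_of_le hf1 with h | h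
                  · exact h
                  · exact absurd (h ▸ hf3) hq
                rw [if_pos (Or.inr (by rw [hds]; exact hgt)), hds]
            · rw [if_neg hq, if_neg hdl]
              have hfs := pvFind_shift t '"' p h0 hlt hq
              have hdsh := pvDelim_shift t p h0 hlt hdl
              by_cases hend : p + 1 < (t.length : Int)
              · have hIH := (ih (p + 1) (by omega) (by omega)).1 ka' (kb' + 1) (by omega) (by omega)
                rw [hfs, hdsh, hIH, pvB_outer_step t kb' (p + 1) hend]
              · rw [hfs, hdsh, pvA_out t ka' (p + 1) false false (by omega),
                    pvFind_none t '"' (p + 1) (by omega) (by omega),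
                    pvDelim_past t (p + 1) (by omega) (by omega), if_pos (Or.inl rfl)]
                omega
        · -- part 2: inside a string, escaped = False, even backslash run behind us
          intro hpn hEven ka kb ks hka hkb hks
          obtain ⟨ka', rfl⟩ : ∃ x, ka = x + 1 := ⟨ka - 1, by omega⟩
          obtain ⟨ks', rfl⟩ : ∃ x, ks = x + 1 := ⟨ks - 1, by omega⟩
          unfold pvEvenRun at hEven
          rw [pvA_str_step t ka' p hlt, pvB_inner_step t ks' p]
          by_cases hbs : pvGetC t p = '\\'
          · have hq : pvGetC t p ≠ '"' := by rw [hbs]; decide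
            have hfs := pvFind_shift t '"' p h0 hlt hq
            rw [if_pos hbs, hfs]
            by_cases h1 : p + 1 < (t.length : Int)
            · obtain ⟨ka'', rfl⟩ : ∃ x, ka' = x + 1 := ⟨ka' - 1, by omega⟩
              rw [pvA_esc_step t ka'' (p + 1) h1]
              have e2 : p + 1 + 1 = p + 2 := by ring
              rw [e2]
              by_cases hq1 : pvGetC t (p + 1) = '"'
              · have hf1 : pvFind t '"' (p + 1) = p + 1 := pvFind_self t '"' (p + 1) (by omega) h1 hq1
                rw [hf1]
                have e3 : p + 1 - 1 = p := by ring
                rw [e3, pvRunB_back t p h0 hbs]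
                rw [if_neg (by omega : ¬ (p + 1 = -1 : Prop)),
                    if_neg (by omega : ¬ ((p - pvRunB t (p - 1)) % 2 = 0))]
                have hev2 : pvEvenRun t (p + 2) := by
                  unfold pvEvenRun
                  have e4 : p + 2 - 1 = p + 1 := by ring
                  rw [e4, pvRunB_stop t (p + 1)
                    (by intro hx; rw [hq1] at hx; exact absurd hx.2 (by decide))]
                  omega
                rw [e2]
                exact (ih (p + 2) (by omega) (by omega)).2 (by omega) hev2 ka'' kb ks'
                  (by omega) (by omega) (by omega)
              · have hf2 : pvFind t '"' (p + 1) = pvFind t '"' (p + 2) := by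
                  have := pvFind_shift t '"' (p + 1) (by omega) h1 hq1
                  rw [this, e2]
                have hev2 : pvEvenRun t (p + 2) := by
                  unfold pvEvenRun
                  have e4 : p + 2 - 1 = p + 1 := by ring
                  rw [e4]
                  by_cases hb1 : pvGetC t (p + 1) = '\\'
                  · rw [pvRunB_back t (p + 1) (by omega) hb1]
                    have e5 : p + 1 - 1 = p := by ring
                    rw [e5, pvRunB_back t p h0 hbs]
                    omega
                  · rw [pvRunB_stop t (p + 1) (by intro hx; exact hb1 hx.2)]
                    omega
                have hIH := (ih (p + 2) (by omega) (by omega)).2 (by omega) hev2 ka'' kb (ks' + 1)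
                  (by omega) (by omega) (by omega)
                rw [hf2, hIH, pvB_inner_step t ks' (p + 2)]
            · have hpe : p + 1 = (t.length : Int) := by omega
              rw [pvA_out t ka' (p + 1) true true (by omega),
                  pvFind_none t '"' (p + 1) (by omega) (by omega), if_pos rfl,
                  pvB_outer_out t kb (t.length : Int) (by omega)]
              exact hpe
          · by_cases hq : pvGetC t p = '"'
            · have hf : pvFind t '"' p = p := pvFind_self t '"' p h0 hlt hq
              rw [if_neg hbs, if_pos hq, hf,
                  if_neg (by omega : ¬ (p = -1 : Prop)), if_pos hEven]
              exact (ih (p + 1) (by omega) (by omega)).1 ka' kb (by omega) (by omega)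
            · have hfs := pvFind_shift t '"' p h0 hlt hq
              have hev2 : pvEvenRun t (p + 1) := by
                unfold pvEvenRun
                have e : p + 1 - 1 = p := by ring
                rw [e, pvRunB_stop t p (by intro hx; exact hbs hx.2)]
                omega
              have hIH := (ih (p + 1) (by omega) (by omega)).2 (by omega) hev2 ka' kb (ks' + 1)
                (by omega) (by omega) (by omega)
              rw [if_neg hbs, if_neg hq, hfs, hIH, pvB_inner_step t ks' (p + 1)]
      · -- p ≥ length: both sides are already out of the text
        constructor
        · intro ka kb _ _
          rw [pvA_out t ka p false false hlt, pvB_outer_out t kb p hlt]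
        · intro hpn _ ka kb ks _ _ hks
          have hpe : p = (t.length : Int) := by omega
          obtain ⟨ks', rfl⟩ : ∃ x, ks = x + 1 := ⟨ks - 1, by omega⟩
          rw [pvA_out t ka p true false hlt, pvB_inner_step t ks' p,
              pvFind_none t '"' p h0 (by omega), if_pos rfl,
              pvB_outer_out t kb (t.length : Int) (by omega)]
          exact hpe

-- ===== VERDICT (by name: the statement is the Claim_ definition above) =====
theorem line_local_value_window_py_spec : Claim_equal_line_local_value_window_py := by
  intro line_text colon_idx _ hpre
  unfold Pre_line_local_value_window_py at hpre
  unfold Spec_line_local_value_window_py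
  unfold line_local_value_window_py line_local_value_window_py_alt
  have hvs0 : 0 ≤ pvSkipWs line_text.toList
      ((line_text.toList.length : Int) - (colon_idx + 1)).toNat (colon_idx + 1) := by
    have := pvSkipWs_ge line_text.toList
      ((line_text.toList.length : Int) - (colon_idx + 1)).toNat (colon_idx + 1)
    omega
  have h := (pvAB line_text.toList
      (((line_text.toList.length : Int) -
          pvSkipWs line_text.toList
            ((line_text.toList.length : Int) - (colon_idx + 1)).toNat (colon_idx + 1)).toNat)
      (pvSkipWs line_text.toList
          ((line_text.toList.length : Int) - (colon_idx + 1)).toNat (colon_idx + 1))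
      hvs0 le_rfl).1 _ _ le_rfl le_rfl
  simp only [h]
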